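-- pv_equiv track=rewrite | github.com/CycloneBoy/ml-learn | util/nlp_utils.py | gram_uni_bi_tri
-- ===== SOURCE A (Python) =====
-- def gram_uni_bi_tri(text):
--     """
--       获取文本的unigram, trugram, bigram等特征
--     :param text:
--     :return:
--     """
--     len_text = len(text)
--     gram_uni = []
--     gram_bi = []
--     gram_tri = []
--     for i in range(len_text):
--         if i + 3 <= len_text:
--             gram_uni.append(text[i])
--             gram_bi.append(text[i:i + 2])
--             gram_tri.append(text[i:i + 3])
--         elif i + 2 <= len_text:
--             gram_uni.append(text[i])
--             gram_bi.append(text[i:i + 2])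
--         elif i + 1 <= len_text:
--             gram_uni.append(text[i])
--         else:
--             break
--     return gram_uni, gram_bi, gram_tri
-- ===== SOURCE B (Python) =====
-- def gram_uni_bi_tri(text):
--     uni, bi, tri = [], [], []
--     window = ""  # up to the next two characters, in original order
--     for ch in reversed(text):
--         uni.append(ch)
--         if len(window) >= 1:
--             bi.append(ch + window[0])
--         if len(window) >= 2:
--             tri.append(ch + window)
--         window = (ch + window)[:2]
--     uni.reverse()
--     bi.reverse()
--     tri.reverse()
--     return uni, bi, tri
-- ===== Notes on version B (the rewrite author's own statement) =====
-- stated objective: alternative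
-- what changed: Replaces A's index-based loop that slices text[i:i+k] under if/elif length guards by a single pass over reversed(text) that maintains a two-character lookahead window, concatenates each character with that window to form the bigrams and trigrams, builds all three lists back-to-front and reverses them at the end - no indexing or slicing of the input at all.
import Mathlib
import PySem

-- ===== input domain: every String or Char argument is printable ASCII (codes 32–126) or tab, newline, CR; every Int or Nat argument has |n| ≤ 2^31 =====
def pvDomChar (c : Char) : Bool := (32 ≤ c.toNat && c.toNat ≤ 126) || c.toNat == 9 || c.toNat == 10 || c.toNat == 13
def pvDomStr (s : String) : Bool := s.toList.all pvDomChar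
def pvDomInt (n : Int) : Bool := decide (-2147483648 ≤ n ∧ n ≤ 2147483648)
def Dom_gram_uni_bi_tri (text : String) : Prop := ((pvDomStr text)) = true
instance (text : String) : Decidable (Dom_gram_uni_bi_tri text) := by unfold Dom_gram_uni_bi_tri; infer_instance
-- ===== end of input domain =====

-- B replaces A's index-and-slice loop by a single reverse pass that maintains a two-character
-- lookahead window and builds all three lists back-to-front (alternative decomposition, same cost).

-- ===== PORT A =====
-- text[i] for a string: a one-character string (index always in range where used; getD "" is never taken)
def pyCharAt (text : String) (i : Int) : String :=
  ((PySem.Str.pyGet? text i).map (fun c => String.ofList [c])).getD ""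

-- the for-loop over range(len_text), with the (unreachable) else: break kept as an early return
def gaLoop (text : String) (n : Int) : List Int → (List String × List String × List String) → (List String × List String × List String)
  | [], st => st
  | i :: rest, (u, b, t) =>
    if i + 3 ≤ n then
      gaLoop text n rest (u ++ [pyCharAt text i],
        b ++ [PySem.Str.slice text (some i) (some (i + 2))],
        t ++ [PySem.Str.slice text (some i) (some (i + 3))])
    else if i + 2 ≤ n then
      gaLoop text n rest (u ++ [pyCharAt text i],
        b ++ [PySem.Str.slice text (some i) (some (i + 2))], t)
    else if i + 1 ≤ n then
      gaLoop text n rest (u ++ [pyCharAt text i], b, t)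
    else (u, b, t)

def gram_uni_bi_tri (text : String) : List String × List String × List String :=
  gaLoop text (PySem.Str.len text) (PySem.List.pyRange 0 (PySem.Str.len text) 1) ([], [], [])

-- ===== PORT B =====
-- the 'for ch in reversed(text)' loop: window holds the (up to two) characters just processed,
-- i.e. the two characters that FOLLOW ch in the original string
def gbLoop : List Char → List String × List String × List String × List Char → List String × List String × List String × List Char
  | [], st => st
  | ch :: rest, (u, b, t, w) =>
    gbLoop rest
      (u ++ [String.ofList [ch]],
       if 1 ≤ w.length then b ++ [String.ofList (ch :: w.take 1)] else b,
       if 2 ≤ w.length then t ++ [String.ofList (ch :: w)] else t,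
       (ch :: w).take 2)

def gram_uni_bi_tri_alt (text : String) : List String × List String × List String :=
  let r := gbLoop text.toList.reverse ([], [], [], [])
  (r.1.reverse, r.2.1.reverse, r.2.2.1.reverse)

-- ===== PRECONDITION & SPEC =====
def Spec_gram_uni_bi_tri (text : String) (out : List String × List String × List String) : Prop := out = gram_uni_bi_tri_alt text
instance (text : String) (out : List String × List String × List String) : Decidable (Spec_gram_uni_bi_tri text out) := by unfold Spec_gram_uni_bi_tri; infer_instance

-- ===== CLAIM (what is proved, stated in full; the proofs are below) =====
def Claim_equal_gram_uni_bi_tri : Prop := ∀ (text : String), Dom_gram_uni_bi_tri text → Spec_gram_uni_bi_tri text (gram_uni_bi_tri text)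

-- ===== LEMMAS AND PROOFS =====

-- reference windows, used only by the proofs
def biW : List Char → List String
  | a :: b :: r => String.ofList [a, b] :: biW (b :: r)
  | _ => []

def triW : List Char → List String
  | a :: b :: c :: r => String.ofList [a, b, c] :: triW (b :: c :: r)
  | _ => []

-- ---- A-side: reduce the fused loop to three maps over ranges, then to the reference windows ----

-- filtering a unit-step range by 'i + k ≤ b' shortens its upper end to b - k + 1
theorem filter_pyRange_le (k b : Int) (hk : 1 ≤ k) :
    ∀ a, (PySem.List.pyRange a b 1).filter (fun i => decide (i + k ≤ b)) =
      PySem.List.pyRange a (b - k + 1) 1 := by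
  intro a
  induction hn : (b - a).toNat generalizing a with
  | zero =>
    rw [PySem.List.pyRange_one_eq_nil (by omega), PySem.List.pyRange_one_eq_nil (by omega)]
    rfl
  | succ m ih =>
    rw [PySem.List.pyRange_one_cons (by omega)]
    rw [List.filter_cons]
    by_cases h : a + k ≤ b
    · rw [PySem.List.pyRange_one_cons (show a < b - k + 1 by omega)]
      simp only [h, decide_true, if_true]
      rw [ih (a + 1) (by omega)]
    · rw [ih (a + 1) (by omega)]
      rw [PySem.List.pyRange_one_eq_nil (by omega), PySem.List.pyRange_one_eq_nil (by omega)]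
      simp [h]

theorem gaLoop_spec (text : String) (n : Int) (idxs : List Int)
    (hb : ∀ i ∈ idxs, i < n) :
    ∀ u b t, gaLoop text n idxs (u, b, t) =
      (u ++ idxs.map (fun i => pyCharAt text i),
       b ++ (idxs.filter (fun i => decide (i + 2 ≤ n))).map
              (fun i => PySem.Str.slice text (some i) (some (i + 2))),
       t ++ (idxs.filter (fun i => decide (i + 3 ≤ n))).map
              (fun i => PySem.Str.slice text (some i) (some (i + 3)))) := by
  induction idxs with
  | nil => intro u b t; simp [gaLoop]
  | cons i rest ih =>
    intro u b t
    have hi : i < n := hb i (List.mem_cons_self ..)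
    have hb' : ∀ j ∈ rest, j < n := fun j hj => hb j (List.mem_cons_of_mem _ hj)
    simp only [gaLoop, List.filter_cons, List.map_cons]
    by_cases h3 : i + 3 ≤ n
    · simp only [h3, if_true, decide_true, show i + 2 ≤ n by omega]
      rw [ih hb']
      simp [List.append_assoc]
    · by_cases h2 : i + 2 ≤ n
      · simp only [h3, if_false, h2, if_true, decide_true, decide_false]
        rw [ih hb']
        simp [List.append_assoc]
      · simp only [h3, h2, if_false, show i + 1 ≤ n by omega, if_true, decide_false]
        rw [ih hb']
        simp [List.append_assoc]

-- maps of length-k windows over Nat ranges equal the reference windows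
theorem map_range_take1 : ∀ L : List Char,
    (List.range L.length).map (fun j => String.ofList ((L.drop j).take 1)) =
      L.map (fun c => String.ofList [c]) := by
  intro L
  induction L with
  | nil => rfl
  | cons c cs ih =>
    rw [show (c :: cs).length = cs.length + 1 from rfl, List.range_succ_eq_map]
    simp only [List.map_cons, List.map_map]
    refine congrArg₂ _ rfl ?_
    rw [← ih]
    rfl

theorem map_range_take2 : ∀ L : List Char,
    (List.range (L.length - 1)).map (fun j => String.ofList ((L.drop j).take 2)) = biW L := by
  intro L
  induction L with
  | nil => rfl
  | cons c cs ih =>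
    match cs, ih with
    | [], _ => rfl
    | d :: cs', ih =>
      rw [show ((c :: d :: cs').length - 1) = ((d :: cs').length - 1) + 1 by simp,
          List.range_succ_eq_map]
      simp only [List.map_cons, List.map_map]
      rw [show biW (c :: d :: cs') = String.ofList [c, d] :: biW (d :: cs') from rfl, ← ih]
      exact congrArg₂ _ rfl rfl

theorem map_range_take3 : ∀ L : List Char,
    (List.range (L.length - 2)).map (fun j => String.ofList ((L.drop j).take 3)) = triW L := by
  intro L
  induction L with
  | nil => rfl
  | cons c cs ih =>
    match cs, ih with
    | [], _ => rfl
    | [d], _ => rfl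
    | d :: e :: cs', ih =>
      rw [show ((c :: d :: e :: cs').length - 2) = ((d :: e :: cs').length - 2) + 1 by simp,
          List.range_succ_eq_map]
      simp only [List.map_cons, List.map_map]
      rw [show triW (c :: d :: e :: cs') = String.ofList [c, d, e] :: triW (d :: e :: cs') from rfl,
          ← ih]
      exact congrArg₂ _ rfl rfl

theorem pyCharAt_nat (text : String) (j : Nat) (hj : j < text.toList.length) :
    pyCharAt text (j : Int) = String.ofList ((text.toList.drop j).take 1) := by
  have hjl : j < text.length := by simpa using hj
  unfold pyCharAt
  simp [PySem.Str.pyGet?, PySem.List.pyGet?, PySem.List.pyIdx?, hjl]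
  rw [List.drop_eq_getElem_cons hj, List.take_succ_cons, List.take_zero]

-- A's three components, via the reference windows
theorem gramA_eq (text : String) :
    gram_uni_bi_tri text =
      (text.toList.map (fun c => String.ofList [c]), biW text.toList, triW text.toList) := by
  unfold gram_uni_bi_tri
  rw [gaLoop_spec text (PySem.Str.len text) _
      (fun i hi => (PySem.List.mem_pyRange_one.mp hi).2)]
  rw [filter_pyRange_le 2 (PySem.Str.len text) (by omega) 0,
      filter_pyRange_le 3 (PySem.Str.len text) (by omega) 0]
  simp only [List.nil_append]
  refine congrArg₂ _ ?_ (congrArg₂ _ ?_ ?_)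
  · rw [PySem.List.pyRange_one 0 (PySem.Str.len text), List.map_map]
    rw [show (PySem.Str.len text - 0).toNat = text.toList.length by
      simp [PySem.Str.len]]
    rw [← map_range_take1 text.toList]
    refine List.map_congr_left fun j hj => ?_
    have hj' : j < text.toList.length := List.mem_range.mp hj
    simp only [Function.comp]
    rw [show (0 : Int) + (j : Int) = (j : Int) by ring, pyCharAt_nat text j hj']
  · rw [PySem.List.pyRange_one 0 (PySem.Str.len text - 2 + 1), List.map_map]
    rw [show (PySem.Str.len text - 2 + 1 - 0).toNat = text.toList.length - 1 by
      simp [PySem.Str.len]; omega]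
    rw [← map_range_take2 text.toList]
    refine List.map_congr_left fun j _ => ?_
    simp only [Function.comp, PySem.Str.slice, PySem.Chars.slice]
    rw [show (0 : Int) + (j : Int) = (j : Int) by ring,
        show (j : Int) + 2 = (j : Int) + ((2 : Nat) : Int) by norm_num,
        PySem.List.slice_natCast_add]
  · rw [PySem.List.pyRange_one 0 (PySem.Str.len text - 3 + 1), List.map_map]
    rw [show (PySem.Str.len text - 3 + 1 - 0).toNat = text.toList.length - 2 by
      simp [PySem.Str.len]; omega]
    rw [← map_range_take3 text.toList]
    refine List.map_congr_left fun j _ => ?_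
    simp only [Function.comp, PySem.Str.slice, PySem.Chars.slice]
    rw [show (0 : Int) + (j : Int) = (j : Int) by ring,
        show (j : Int) + 3 = (j : Int) + ((3 : Nat) : Int) by norm_num,
        PySem.List.slice_natCast_add]

-- ---- B-side: the reverse pass with a lookahead window equals the reference windows ----

theorem biW_snoc : ∀ (Z : List Char) (c d : Char),
    biW (Z ++ [c, d]) = biW (Z ++ [c]) ++ [String.ofList [c, d]] := by
  intro Z
  induction Z with
  | nil => intro c d; rfl
  | cons a Z' ih =>
    intro c d
    match Z' with
    | [] => rfl
    | e :: Z'' =>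
      have := ih c d
      simp only [List.cons_append, biW] at this ⊢
      rw [this]

theorem triW_snoc : ∀ (Z : List Char) (c d e : Char),
    triW (Z ++ [c, d, e]) = triW (Z ++ [c, d]) ++ [String.ofList [c, d, e]] := by
  intro Z
  induction Z with
  | nil => intro c d e; rfl
  | cons a Z' ih =>
    intro c d e
    match Z' with
    | [] => rfl
    | [x] => rfl
    | x :: y :: Z'' =>
      have := ih c d e
      simp only [List.cons_append, triW] at this ⊢
      rw [this]

theorem take_append_take (X Y : List Char) (n : Nat) :
    (X ++ Y.take n).take n = (X ++ Y).take n := by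
  rw [List.take_append, List.take_append, List.take_take]
  have h : min (n - X.length) n = n - X.length := by omega
  rw [h]

theorem gbLoop_spec : ∀ (M : List Char) (w : List Char), w.length ≤ 2 →
    ∀ u b t, gbLoop M (u, b, t, w) =
      (u ++ (M.reverse.map (fun c => String.ofList [c])).reverse,
       b ++ (biW (M.reverse ++ w.take 1)).reverse,
       t ++ (triW (M.reverse ++ w)).reverse,
       (M.reverse ++ w).take 2) := by
  intro M
  induction M with
  | nil =>
    intro w hw u b t
    simp only [gbLoop, List.reverse_nil, List.map_nil, List.nil_append, List.take_of_length_le hw]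
    refine congrArg₂ _ (by simp) (congrArg₂ _ ?_ (congrArg₂ _ ?_ rfl))
    · match w, hw with
      | [], _ => simp [biW]
      | [x], _ => simp [biW]
      | [x, y], _ => simp [biW]
    · match w, hw with
      | [], _ => simp [triW]
      | [x], _ => simp [triW]
      | [x, y], _ => simp [triW]
  | cons ch rest ih =>
    intro w hw u b t
    simp only [gbLoop]
    rw [ih ((ch :: w).take 2) (by simp) _ _ _]
    have hw2 : ((ch :: w).take 2).take 1 = [ch] := by
      match w with
      | [] => rfl
      | x :: w' => rfl
    refine congrArg₂ _ ?_ (congrArg₂ _ ?_ (congrArg₂ _ ?_ ?_))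
    · simp
    · rw [hw2]
      match w, hw with
      | [], _ => simp
      | x :: w', _ =>
        have : biW ((rest.reverse ++ [ch]) ++ (x :: w').take 1) =
            biW (rest.reverse ++ [ch]) ++ [String.ofList [ch, x]] := by
          simpa using biW_snoc rest.reverse ch x
        simp only [List.length_cons, le_add_iff_nonneg_left, Nat.zero_le, if_true,
          List.reverse_cons, List.take_succ_cons, List.take_zero] at this ⊢
        rw [show rest.reverse ++ [ch] ++ [x] = rest.reverse ++ ([ch] ++ [x]) by simp] at this
        simp only [List.append_assoc] at this ⊢
        rw [this]
        simp
    · match w, hw with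
      | [], _ => simp
      | [x], _ =>
        simp
      | [x, y], _ =>
        have h := triW_snoc rest.reverse ch x y
        simp only [List.length_cons, List.length_nil, List.reverse_cons, List.take_succ_cons,
          List.take_zero] at *
        rw [if_pos (by omega),
            show rest.reverse ++ [ch] ++ [x, y] = rest.reverse ++ [ch, x, y] by simp, h]
        simp
    · simp only [List.reverse_cons, List.append_assoc, List.singleton_append]
      exact take_append_take rest.reverse (ch :: w) 2

-- B's three components, via the reference windows
theorem gramB_eq (text : String) :
    gram_uni_bi_tri_alt text =
      (text.toList.map (fun c => String.ofList [c]), biW text.toList, triW text.toList) := by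
  unfold gram_uni_bi_tri_alt
  rw [gbLoop_spec text.toList.reverse [] (by simp)]
  simp

-- ===== VERDICT (by name: the statement is the Claim_ definition above) =====
theorem gram_uni_bi_tri_spec : Claim_equal_gram_uni_bi_tri := by
  intro text _
  unfold Spec_gram_uni_bi_tri
  rw [gramA_eq, gramB_eq]
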